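-- pv_equiv track=rewrite | github.com/haxscramper/hack | testing/python/lab6.py | broad_by_mask
-- ===== SOURCE A (Python) =====
-- def ten_to_bin(a):
--     s = ""
--     while (a > 0):
--         s = str(a%2) + s
--         a = int(a / 2)
--     return s
--
-- def bin_to_ten (a):
--     n = 0
--     for i in range(len(a)):
--         if a[i] == "1":
--             n += 2**(len(a) - 1- i)
--     return n
--
-- def ip_to_ten (A):
--     S = []
--     for i in range(4):
--         s = bin_to_ten(A[i])
--         S.append(str(s))
--     return S
--
-- def ip_to_bin (A):
--     S = []
--     for i in range(4):
--         s = ten_to_bin(int(A[i]))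
--         S.append("0"*(8-len(s))+s)
--     return S
--
-- def broad_by_mask (IP, MASK):
--     ip = ip_to_bin(IP)
--     mask = ip_to_bin(MASK)
--     brd = []
--     for i in range(4):
--         s = ""
--         for j in range(8):
--             if mask[i][j] == "0":
--                 s += "1"
--             elif ip[i][j] == "1":
--                 s += "1"
--             else:
--                 s += "0"
--         brd.append(s)
--     return ip_to_ten(brd)
-- ===== SOURCE B (Python) =====
-- def broad_by_mask(IP, MASK):
--     return [str(int(IP[k]) | (255 - int(MASK[k]))) for k in range(4)]
-- ===== Notes on version B (the rewrite author's own statement) =====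
-- stated objective: faster
-- what changed: Replaces the decimal->binary-string conversion, per-character 8-bit loop and binary-string->decimal reparse with a single comprehension computing each broadcast octet by integer arithmetic, ip | (255 - mask).
import Mathlib
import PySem

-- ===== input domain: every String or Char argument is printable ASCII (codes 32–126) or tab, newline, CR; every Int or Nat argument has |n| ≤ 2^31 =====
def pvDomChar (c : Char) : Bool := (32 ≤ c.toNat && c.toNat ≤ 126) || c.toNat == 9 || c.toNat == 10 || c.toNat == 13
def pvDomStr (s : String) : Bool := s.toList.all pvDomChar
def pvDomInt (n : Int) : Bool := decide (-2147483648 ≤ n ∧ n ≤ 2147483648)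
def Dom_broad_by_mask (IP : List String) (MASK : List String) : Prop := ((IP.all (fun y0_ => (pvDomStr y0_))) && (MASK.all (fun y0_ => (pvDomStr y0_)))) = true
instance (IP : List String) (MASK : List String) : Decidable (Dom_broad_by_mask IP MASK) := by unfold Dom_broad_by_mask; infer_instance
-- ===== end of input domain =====

-- B computes each broadcast octet by integer arithmetic (ip | (255 - mask)) instead of A's
-- decimal->binary-string conversion, per-character 8-bit loop and binary->decimal reparse.

-- ===== PORT A =====
-- ten_to_bin: the while-loop as structural recursion on a fuel counter; a.toNat + 1 iterations always
-- suffice because a strictly decreases while positive.  int(a/2) is ported as PySem.Int.truncdiv a 2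
-- (= int(a/b), exact for the small values reachable here).
def tenToBinAux : Nat → Int → List Char
  | 0, _ => []
  | fuel+1, a =>
    if a > 0 then tenToBinAux fuel (PySem.Int.truncdiv a 2) ++ PySem.Int.toChars (PySem.Int.mod a 2)
    else []

def tenToBin (a : Int) : List Char := tenToBinAux (a.toNat + 1) a

-- bin_to_ten; the exponent len(a)-1-i is a nonnegative int in Python (i < len(a)), so Nat subtraction
-- with i.toNat is exact.
def binToTen (a : List Char) : Int :=
  (PySem.List.pyRange 0 a.length 1).foldl
    (fun n i => if PySem.List.pyGetD a i ' ' = '1' then n + 2 ^ (a.length - 1 - i.toNat) else n) 0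

-- ip_to_ten (A always applies it to the 4-element brd list, so A[i] is in range)
def ipToTen (A : List (List Char)) : List String :=
  (PySem.List.pyRange 0 4 1).foldl
    (fun S i => S ++ [PySem.Int.toStr (binToTen (PySem.List.pyGetD A i []))]) []

-- ip_to_bin; "0"*(8-len(s)) is List.replicate with Nat subtraction (empty for len(s) > 8, like Python);
-- A[i] / int(A[i]) are pyGetD / ofStr?-getD, exact under Pre_ (index in range and string parseable there).
def ipToBin (A : List String) : List (List Char) :=
  (PySem.List.pyRange 0 4 1).foldl
    (fun S i =>
      let s := tenToBin ((PySem.Int.ofStr? (PySem.List.pyGetD A i "")).getD 0)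
      S ++ [List.replicate (8 - s.length) '0' ++ s]) []

def broad_by_mask (IP : List String) (MASK : List String) : List String :=
  let ip := ipToBin IP
  let mask := ipToBin MASK
  let brd := (PySem.List.pyRange 0 4 1).foldl
    (fun brd i =>
      let s := (PySem.List.pyRange 0 8 1).foldl
        (fun s j =>
          if PySem.List.pyGetD (PySem.List.pyGetD mask i []) j ' ' = '0' then s ++ ['1']
          else if PySem.List.pyGetD (PySem.List.pyGetD ip i []) j ' ' = '1' then s ++ ['1']
          else s ++ ['0']) []
      brd ++ [s]) []
  ipToTen brd

-- ===== PORT B =====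
def broad_by_mask_alt (IP : List String) (MASK : List String) : List String :=
  (PySem.List.pyRange 0 4 1).map
    (fun k => PySem.Int.toStr (PySem.Int.bor
        ((PySem.Int.ofStr? (PySem.List.pyGetD IP k "")).getD 0)
        (255 - (PySem.Int.ofStr? (PySem.List.pyGetD MASK k "")).getD 0)))

-- ===== PRECONDITION & SPEC =====
-- The natural domain of the function: each of the first four entries of IP and MASK is an int()-parseable
-- octet in 0..255.  This excludes inputs where A raises (fewer than 4 entries: IndexError; an entry int()
-- rejects: ValueError) and also octets outside 0..255, on which A still returns a value but that value is
-- an artefact of truncating/zero-padding the binary string (e.g. "300" is read as 150, "-1" as 0) — such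
-- inputs are outside any sensible use of an IP/netmask function (see claim cites).
def Pre_broad_by_mask (IP : List String) (MASK : List String) : Prop :=
  ∀ i ∈ PySem.List.pyRange 0 4 1,
    (0 ≤ (PySem.Int.ofStr? (PySem.List.pyGetD IP i "")).getD (-1) ∧
     (PySem.Int.ofStr? (PySem.List.pyGetD IP i "")).getD (-1) ≤ 255) ∧
    (0 ≤ (PySem.Int.ofStr? (PySem.List.pyGetD MASK i "")).getD (-1) ∧
     (PySem.Int.ofStr? (PySem.List.pyGetD MASK i "")).getD (-1) ≤ 255)
instance (IP : List String) (MASK : List String) : Decidable (Pre_broad_by_mask IP MASK) := by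
  unfold Pre_broad_by_mask; infer_instance

def pvWitness_broad_by_mask : List String × List String :=
  (["192", "168", "1", "7"], ["255", "255", "255", "0"])

def Spec_broad_by_mask (IP : List String) (MASK : List String) (out : List String) : Prop := out = broad_by_mask_alt IP MASK
instance (IP : List String) (MASK : List String) (out : List String) : Decidable (Spec_broad_by_mask IP MASK out) := by unfold Spec_broad_by_mask; infer_instance

-- ===== CLAIM (what is proved, stated in full; the proofs are below) =====
def Claim_equal_broad_by_mask : Prop := ∀ (IP : List String) (MASK : List String), Dom_broad_by_mask IP MASK → Pre_broad_by_mask IP MASK → Spec_broad_by_mask IP MASK (broad_by_mask IP MASK)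

-- ===== LEMMAS AND PROOFS =====

-- the 8-bit binary representation of an octet, most significant bit first
def bits8 (n : Nat) : List Char := (List.range 8).map (fun j => if n.testBit (7-j) then '1' else '0')

-- A's zero-padding of a binary string
def pad8 (s : List Char) : List Char := List.replicate (8 - s.length) '0' ++ s

-- the padded binary string A computes for entry i of A (ip_to_bin's loop body)
def padOct (A : List String) (i : Int) : List Char :=
  pad8 (tenToBin ((PySem.Int.ofStr? (PySem.List.pyGetD A i "")).getD 0))

-- A's inner 8-step loop over one (mask, ip) pair of padded strings
def innerFold (mask ip : List Char) : List Char :=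
  (PySem.List.pyRange 0 8 1).foldl
    (fun s j =>
      if PySem.List.pyGetD mask j ' ' = '0' then s ++ ['1']
      else if PySem.List.pyGetD ip j ' ' = '1' then s ++ ['1']
      else s ++ ['0']) []

set_option maxRecDepth 100000 in
set_option maxHeartbeats 1000000 in
lemma padBits : ∀ x : Fin 256, pad8 (tenToBin (x.val : Int)) = bits8 x.val := by decide

set_option maxRecDepth 100000 in
set_option maxHeartbeats 1000000 in
lemma binBits : ∀ x : Fin 256, binToTen (bits8 x.val) = (x.val : Int) := by decide

set_option maxRecDepth 10000 in
lemma sub255 : ∀ x : Fin 256, 255 - x.val = 255 ^^^ x.val := by decide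

lemma testBit_sub255 (b : Nat) (hb : b < 256) (k : Nat) (hk : k < 8) :
    (255 - b).testBit k = !b.testBit k := by
  rw [sub255 ⟨b, hb⟩, Nat.testBit_xor]
  have h255 := Nat.testBit_two_pow_sub_one 8 k
  simp only [show (2:Nat)^8 - 1 = 255 from rfl] at h255
  simp [h255, hk]

lemma stepChar (a b : Nat) (hb : b < 256) (k : Nat) (hk : k < 8) :
    (if (if b.testBit k then '1' else '0') = '0' then '1'
     else if (if a.testBit k then '1' else '0') = '1' then '1' else '0')
    = (if (a ||| (255 - b)).testBit k then '1' else '0') := by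
  have h1 := testBit_sub255 b hb k hk
  cases hbt : b.testBit k <;> cases hat : a.testBit k <;>
    simp [Nat.testBit_or, h1, hbt, hat]

lemma innerFold_eq_map (m i : List Char) :
    innerFold m i = (PySem.List.pyRange 0 8 1).map
      (fun j => if PySem.List.pyGetD m j ' ' = '0' then '1'
        else if PySem.List.pyGetD i j ' ' = '1' then '1' else '0') := by
  unfold innerFold
  rw [List.foldl_ext (g := fun s j =>
        s ++ [if PySem.List.pyGetD m j ' ' = '0' then '1'
          else if PySem.List.pyGetD i j ' ' = '1' then '1' else '0'])
      (H := by intro s j _; split_ifs <;> simp_all)]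
  exact PySem.List.foldl_append_singleton_eq_map _ _ _

lemma combine (a b : Nat) (hb : b < 256) :
    innerFold (bits8 b) (bits8 a) = bits8 (a ||| (255 - b)) := by
  rw [innerFold_eq_map]
  simp only [bits8, show PySem.List.pyRange 0 8 1 = [0,1,2,3,4,5,6,7] from rfl,
    show List.range 8 = [0,1,2,3,4,5,6,7] from rfl, List.map_cons, List.map_nil, List.cons.injEq,
    and_true]
  refine ⟨stepChar a b hb 7 (by omega), stepChar a b hb 6 (by omega), stepChar a b hb 5 (by omega),
    stepChar a b hb 4 (by omega), stepChar a b hb 3 (by omega), stepChar a b hb 2 (by omega),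
    stepChar a b hb 1 (by omega), stepChar a b hb 0 (by omega)⟩

lemma octet (a b : Nat) (ha : a < 256) (hb : b < 256) :
    binToTen (innerFold (pad8 (tenToBin (b : Int))) (pad8 (tenToBin (a : Int))))
    = PySem.Int.bor (a : Int) (255 - (b : Int)) := by
  rw [padBits ⟨b, hb⟩, padBits ⟨a, ha⟩, combine a b hb,
      binBits ⟨a ||| (255 - b), Nat.or_lt_two_pow (n := 8) ha (by omega)⟩]
  have hcast : (255 : Int) - (b : Nat) = ((255 - b : Nat) : Int) := by omega
  rw [hcast, PySem.Int.bor_natCast]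

lemma octetPair (sIP sM : String)
    (h : (0 ≤ (PySem.Int.ofStr? sIP).getD (-1) ∧ (PySem.Int.ofStr? sIP).getD (-1) ≤ 255) ∧
         (0 ≤ (PySem.Int.ofStr? sM).getD (-1) ∧ (PySem.Int.ofStr? sM).getD (-1) ≤ 255)) :
    PySem.Int.toStr (binToTen (innerFold
        (pad8 (tenToBin ((PySem.Int.ofStr? sM).getD 0)))
        (pad8 (tenToBin ((PySem.Int.ofStr? sIP).getD 0)))))
    = PySem.Int.toStr (PySem.Int.bor ((PySem.Int.ofStr? sIP).getD 0)
        (255 - (PySem.Int.ofStr? sM).getD 0)) := by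
  rcases hip : PySem.Int.ofStr? sIP with _ | vI <;> rw [hip] at h
  · simp at h
  rcases him : PySem.Int.ofStr? sM with _ | vM <;> rw [him] at h
  · simp at h
  simp only [Option.getD_some] at h ⊢
  have eI : ((vI.toNat : Nat) : Int) = vI := Int.toNat_of_nonneg h.1.1
  have eM : ((vM.toNat : Nat) : Int) = vM := Int.toNat_of_nonneg h.2.1
  have hoct := octet vI.toNat vM.toNat (by omega) (by omega)
  rw [eI, eM] at hoct
  exact congrArg PySem.Int.toStr hoct

lemma ipToBin_eq (A : List String) :
    ipToBin A = [padOct A 0, padOct A 1, padOct A 2, padOct A 3] := rfl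

lemma ipToTen_eq (x0 x1 x2 x3 : List Char) :
    ipToTen [x0, x1, x2, x3] = [PySem.Int.toStr (binToTen x0), PySem.Int.toStr (binToTen x1),
      PySem.Int.toStr (binToTen x2), PySem.Int.toStr (binToTen x3)] := rfl

lemma broad_eq (IP MASK : List String) :
    broad_by_mask IP MASK =
      [PySem.Int.toStr (binToTen (innerFold (padOct MASK 0) (padOct IP 0))),
       PySem.Int.toStr (binToTen (innerFold (padOct MASK 1) (padOct IP 1))),
       PySem.Int.toStr (binToTen (innerFold (padOct MASK 2) (padOct IP 2))),
       PySem.Int.toStr (binToTen (innerFold (padOct MASK 3) (padOct IP 3)))] := by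
  unfold broad_by_mask
  rw [ipToBin_eq IP, ipToBin_eq MASK]
  rw [show PySem.List.pyRange 0 4 1 = [0,1,2,3] from rfl]
  simp only [List.foldl]
  rw [show (PySem.List.pyGetD [padOct MASK 0, padOct MASK 1, padOct MASK 2, padOct MASK 3] (0:Int) []) = padOct MASK 0 from rfl,
      show (PySem.List.pyGetD [padOct IP 0, padOct IP 1, padOct IP 2, padOct IP 3] (0:Int) []) = padOct IP 0 from rfl,
      show (PySem.List.pyGetD [padOct MASK 0, padOct MASK 1, padOct MASK 2, padOct MASK 3] (1:Int) []) = padOct MASK 1 from rfl,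
      show (PySem.List.pyGetD [padOct IP 0, padOct IP 1, padOct IP 2, padOct IP 3] (1:Int) []) = padOct IP 1 from rfl,
      show (PySem.List.pyGetD [padOct MASK 0, padOct MASK 1, padOct MASK 2, padOct MASK 3] (2:Int) []) = padOct MASK 2 from rfl,
      show (PySem.List.pyGetD [padOct IP 0, padOct IP 1, padOct IP 2, padOct IP 3] (2:Int) []) = padOct IP 2 from rfl,
      show (PySem.List.pyGetD [padOct MASK 0, padOct MASK 1, padOct MASK 2, padOct MASK 3] (3:Int) []) = padOct MASK 3 from rfl,
      show (PySem.List.pyGetD [padOct IP 0, padOct IP 1, padOct IP 2, padOct IP 3] (3:Int) []) = padOct IP 3 from rfl]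
  simp only [List.nil_append, List.cons_append]
  rw [ipToTen_eq]
  rfl

lemma alt_eq (IP MASK : List String) :
    broad_by_mask_alt IP MASK =
      [PySem.Int.toStr (PySem.Int.bor ((PySem.Int.ofStr? (PySem.List.pyGetD IP 0 "")).getD 0)
         (255 - (PySem.Int.ofStr? (PySem.List.pyGetD MASK 0 "")).getD 0)),
       PySem.Int.toStr (PySem.Int.bor ((PySem.Int.ofStr? (PySem.List.pyGetD IP 1 "")).getD 0)
         (255 - (PySem.Int.ofStr? (PySem.List.pyGetD MASK 1 "")).getD 0)),
       PySem.Int.toStr (PySem.Int.bor ((PySem.Int.ofStr? (PySem.List.pyGetD IP 2 "")).getD 0)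
         (255 - (PySem.Int.ofStr? (PySem.List.pyGetD MASK 2 "")).getD 0)),
       PySem.Int.toStr (PySem.Int.bor ((PySem.Int.ofStr? (PySem.List.pyGetD IP 3 "")).getD 0)
         (255 - (PySem.Int.ofStr? (PySem.List.pyGetD MASK 3 "")).getD 0))] := rfl

-- ===== VERDICT (by name: the statement is the Claim_ definition above) =====
theorem broad_by_mask_spec : Claim_equal_broad_by_mask := by
  intro IP MASK _ hpre
  unfold Spec_broad_by_mask
  rw [broad_eq, alt_eq]
  simp only [List.cons.injEq, and_true]
  exact ⟨octetPair _ _ (hpre 0 (by decide)), octetPair _ _ (hpre 1 (by decide)),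
    octetPair _ _ (hpre 2 (by decide)), octetPair _ _ (hpre 3 (by decide))⟩
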